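-- pv_equiv track=rewrite | github.com/aftabsaeedi2015/find-all-workflows | check_tag_exists.py | assign_tag_manually
-- ===== SOURCE A (Python) =====
-- patterns = {
--     'home': ['index', 'home', 'main'],
--     'cart': ['cart', 'basket'],
--     'product': ['product', 'item', 'detail'],
--     'about': ['about', 'contact', 'company', 'team'],
--     'search': ['search', 'find'],
--     'login':['signin','login','sign-in']
-- }
--
-- def assign_tag_manually(url):
--     path = url.lower().split('/')
--     # remove the leading slash
--     path = path[1:]
--
--     # Check if any of the patterns match the path
--     if len(path)>=2:
--         return 'other'
--     else:
--         for category, keywords in patterns.items():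
--             if any(keyword in path for keyword in keywords):
--                 return category
--
--     # If no pattern matches, return "other"
--     return 'other'
-- ===== SOURCE B (Python) =====
-- patterns = {
--     'home': ['index', 'home', 'main'],
--     'cart': ['cart', 'basket'],
--     'product': ['product', 'item', 'detail'],
--     'about': ['about', 'contact', 'company', 'team'],
--     'search': ['search', 'find'],
--     'login':['signin','login','sign-in']
-- }
--
-- # flat reverse-lookup table built once: keyword -> category
-- REVERSE = {kw: cat for cat, kws in patterns.items() for kw in kws}
--
-- def assign_tag_manually(url):
--     path = url.lower().split('/')[1:]
--     return REVERSE.get(path[0], 'other') if len(path) == 1 else 'other'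
-- ===== Notes on version B (the rewrite author's own statement) =====
-- stated objective: simpler
-- what changed: Replaces the loop over categories with an any-scan per keyword list by a single lookup into a flat keyword-to-category table built once; correct because within A the first matching flattened pair is in the first matching category.
import Mathlib
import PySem

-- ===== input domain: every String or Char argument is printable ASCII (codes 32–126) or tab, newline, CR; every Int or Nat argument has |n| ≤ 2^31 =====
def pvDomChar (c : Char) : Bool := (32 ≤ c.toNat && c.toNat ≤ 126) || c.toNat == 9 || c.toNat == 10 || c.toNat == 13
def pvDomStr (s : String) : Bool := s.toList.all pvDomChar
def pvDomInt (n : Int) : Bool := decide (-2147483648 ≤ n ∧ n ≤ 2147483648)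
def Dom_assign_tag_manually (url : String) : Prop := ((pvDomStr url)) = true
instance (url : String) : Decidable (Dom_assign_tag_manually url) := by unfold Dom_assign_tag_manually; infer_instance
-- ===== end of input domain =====

-- B replaces A's category loop with a single lookup in a flat keyword->category table (simpler).

-- shared module-level constant `patterns`
def pvPatterns : List (String × List String) :=
  [("home", ["index", "home", "main"]),
   ("cart", ["cart", "basket"]),
   ("product", ["product", "item", "detail"]),
   ("about", ["about", "contact", "company", "team"]),
   ("search", ["search", "find"]),
   ("login", ["signin", "login", "sign-in"])]

-- ===== PORT A =====
-- the `for category, keywords in patterns.items()` loop with `any(keyword in path …)`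
def pvLoopA (cats : List (String × List String)) (path : List String) : String :=
  match cats with
  | [] => "other"
  | (cat, kws) :: rest => if kws.any (fun k => path.contains k) then cat else pvLoopA rest path

def assign_tag_manually (url : String) : String :=
  let path := ((PySem.Str.split? (PySem.Str.lower url) "/").getD []).drop 1
  if path.length ≥ 2 then "other" else pvLoopA pvPatterns path

-- ===== PORT B =====
-- REVERSE = {kw: cat for cat, kws in patterns.items() for kw in kws}
def pvReverse : PySem.Dict String String :=
  PySem.Dict.ofList (pvPatterns.flatMap (fun p => p.2.map (fun k => (k, p.1))))

def assign_tag_manually_alt (url : String) : String :=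
  let path := ((PySem.Str.split? (PySem.Str.lower url) "/").getD []).drop 1
  if path.length == 1 then pvReverse.getD (path.headD "") "other" else "other"

-- ===== PRECONDITION & SPEC =====
def Spec_assign_tag_manually (url : String) (out : String) : Prop := out = assign_tag_manually_alt url
instance (url : String) (out : String) : Decidable (Spec_assign_tag_manually url out) := by unfold Spec_assign_tag_manually; infer_instance

-- ===== CLAIM (what is proved, stated in full; the proofs are below) =====
def Claim_equal_assign_tag_manually : Prop := ∀ (url : String), Dom_assign_tag_manually url → Spec_assign_tag_manually url (assign_tag_manually url)

-- ===== LEMMAS AND PROOFS =====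

-- one-element path: A's category scan equals B's reverse-table lookup
theorem pvLoopA_singleton (p : String) :
    pvLoopA pvPatterns [p] = pvReverse.getD p "other" := by
  have hrev : pvReverse = PySem.Dict.mk
      [("index", "home"), ("home", "home"), ("main", "home"), ("cart", "cart"), ("basket", "cart"),
       ("product", "product"), ("item", "product"), ("detail", "product"), ("about", "about"),
       ("contact", "about"), ("company", "about"), ("team", "about"), ("search", "search"),
       ("find", "search"), ("signin", "login"), ("login", "login"), ("sign-in", "login")] := by
    decide
  rw [hrev]
  simp only [pvLoopA, pvPatterns, List.any_cons, List.any_nil, List.contains_cons,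
    List.contains_nil, Bool.or_false, Bool.or_eq_true, beq_iff_eq]
  split_ifs with h1 h2 h3 h4 h5 h6
  · rcases h1 with rfl | rfl | rfl <;> decide
  · rcases h2 with rfl | rfl <;> decide
  · rcases h3 with rfl | rfl | rfl <;> decide
  · rcases h4 with rfl | rfl | rfl | rfl <;> decide
  · rcases h5 with rfl | rfl <;> decide
  · rcases h6 with rfl | rfl | rfl <;> decide
  · rw [not_or, not_or] at h1 h3 h6
    rw [not_or, not_or, not_or] at h4
    rw [not_or] at h2 h5
    obtain ⟨n1, n2, n3⟩ := h1
    obtain ⟨n4, n5⟩ := h2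
    obtain ⟨n6, n7, n8⟩ := h3
    obtain ⟨n9, n10, n11, n12⟩ := h4
    obtain ⟨n13, n14⟩ := h5
    obtain ⟨n15, n16, n17⟩ := h6
    simp only [PySem.Dict.getD, PySem.Dict.get?_mk_cons, beq_iff_eq,
      if_neg n1, if_neg n2, if_neg n3, if_neg n4, if_neg n5, if_neg n6, if_neg n7, if_neg n8,
      if_neg n9, if_neg n10, if_neg n11, if_neg n12, if_neg n13, if_neg n14, if_neg n15,
      if_neg n16, if_neg n17]
    simp [PySem.Dict.get?]

theorem pvLoopA_nil : pvLoopA pvPatterns [] = "other" := by decide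

-- ===== VERDICT (by name: the statement is the Claim_ definition above) =====
theorem assign_tag_manually_spec : Claim_equal_assign_tag_manually := by
  intro url _
  unfold Spec_assign_tag_manually assign_tag_manually assign_tag_manually_alt
  cases h : ((PySem.Str.split? (PySem.Str.lower url) "/").getD []).drop 1 with
  | nil => simp [pvLoopA_nil]
  | cons p rest =>
    cases rest with
    | nil => simp [pvLoopA_singleton]
    | cons q rest' => simp
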